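-- pv_equiv track=rewrite | github.com/gokulgk-9402/Daily-CP-November-2022 | ArrayRemovals.py | removals
-- ===== SOURCE A (Python) =====
-- def removals(arr, n, k):
-- 	# code here
-- 	arr.sort()
--
-- 	ans = float('inf')
-- 	last = 0
--
-- 	for end in range(n-1,-1,-1):
-- 	    start = 0
-- 	    while arr[end] - arr[start] > k:
-- 	        start += 1
-- 	    ans = min(ans, start+last)
-- 	    last += 1
--
-- 	return ans
-- ===== SOURCE B (Python) =====
-- def removals(arr, n, k):
--     # Sort, then for each kept right end binary-search the first in-range left
--     # index; the answer is the fewest elements outside the best window.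
--     # (Like the original, this sorts arr in place.)
--     arr.sort()
--
--     def first_ge(xs, target):
--         lo, hi = 0, len(xs)
--         while lo < hi:
--             mid = (lo + hi) // 2
--             if xs[mid] < target:
--                 lo = mid + 1
--             else:
--                 hi = mid
--         return lo
--
--     return min((first_ge(arr, arr[end] - k) + (n - 1 - end) for end in range(n)),
--                default=float('inf'))
-- ===== Notes on version B (the rewrite author's own statement) =====
-- stated objective: faster
-- what changed: replaces A's linear rescan of the left boundary from index 0 for every end by a per-end hand-written binary search (bisect_left) for the first in-range left index, combined through min() over a generator instead of A's descending loop with a min-accumulator and a 'last' counter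
import Mathlib
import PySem

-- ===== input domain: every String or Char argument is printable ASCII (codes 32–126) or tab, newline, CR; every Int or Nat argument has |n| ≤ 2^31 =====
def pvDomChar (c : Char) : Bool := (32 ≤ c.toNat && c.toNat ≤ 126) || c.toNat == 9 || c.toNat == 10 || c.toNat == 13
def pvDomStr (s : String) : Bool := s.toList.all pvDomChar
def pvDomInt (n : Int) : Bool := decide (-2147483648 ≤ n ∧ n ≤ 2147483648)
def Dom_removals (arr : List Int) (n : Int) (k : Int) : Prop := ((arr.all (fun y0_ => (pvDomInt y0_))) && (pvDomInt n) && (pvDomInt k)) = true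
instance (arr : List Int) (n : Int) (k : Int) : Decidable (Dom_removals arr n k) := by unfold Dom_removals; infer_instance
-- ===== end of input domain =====

-- B replaces A's linear per-end rescan from index 0 by a per-end binary search for the first
-- in-range left index, taking the min of the resulting removal counts; both Pythons sort arr
-- in place — the equivalence proved here is about the return value.

-- ===== PORT A =====
-- A's inner 'while arr[end] - arr[start] > k: start += 1' (fuel bounds the loop; with fuel ≥
-- list length the loop stops exactly where Python's does, and where Python would raise
-- IndexError the pyGet? is none and we stop — those inputs are outside Pre_)
def pvScan (a : List Int) (k : Int) (e : Int) : Nat → Int → Int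
  | 0, s => s
  | fuel+1, s =>
    match PySem.List.pyGet? a e, PySem.List.pyGet? a s with
    | some ae, some av => if ae - av > k then pvScan a k e fuel (s+1) else s
    | _, _ => s

-- A's 'ans = min(ans, v)' where ans starts as float('inf') (modelled as none)
def pvMinO (o : Option Int) (v : Int) : Option Int :=
  some (match o with | none => v | some x => min x v)

def removals (arr : List Int) (n : Int) (k : Int) : Int :=
  let a := PySem.List.sorted arr (fun x => x) false
  let st := (PySem.List.pyRange (n-1) (-1) (-1)).foldl
    (fun (st : Option Int × Int) e =>
      let start := pvScan a k e (a.length + 1) 0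
      (pvMinO st.1 (start + st.2), st.2 + 1))
    (none, 0)
  st.1.getD 0

-- ===== PORT B =====
-- B's hand-written bisect 'first_ge': first index in [lo,hi) whose value is ≥ target
-- (fuel ≥ hi - lo suffices; the probed index mid always lies in range inside Pre_,
-- so the getD 0 default is never the value used)
def pvFirstGe (a : List Int) (target : Int) : Nat → Nat → Nat → Nat
  | 0, lo, _ => lo
  | fuel+1, lo, hi =>
    if lo < hi then
      let mid := (lo + hi) / 2
      if (PySem.List.pyGet? a (mid : Int)).getD 0 < target then
        pvFirstGe a target fuel (mid + 1) hi
      else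
        pvFirstGe a target fuel lo mid
    else lo

def removals_alt (arr : List Int) (n : Int) (k : Int) : Int :=
  let a := PySem.List.sorted arr (fun x => x) false
  let vals := (PySem.List.pyRange 0 n 1).map (fun e =>
    ((pvFirstGe a ((PySem.List.pyGet? a e).getD 0 - k) a.length 0 a.length : Nat) : Int)
      + (n - 1 - e))
  -- Python's min(gen, default=inf): inside Pre_ (n ≥ 1) vals is nonempty, so the
  -- default (a float) is never returned; getD 0 is a placeholder for that dead branch
  (PySem.List.min? vals (fun x => x)).getD 0

-- ===== PRECONDITION & SPEC =====
-- Pre_ holds exactly when the Python A returns an int: n must be in [1, len(arr)]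
-- (n ≤ 0 makes A return the float inf, n > len raises IndexError), and the inner while must
-- stop before running off the list for every end < n — on the sorted array that is exactly
-- sorted[n-1] - sorted[len-1] ≤ k (otherwise A raises IndexError).
def Pre_removals (arr : List Int) (n : Int) (k : Int) : Prop :=
  1 ≤ n ∧ n ≤ (arr.length : Int) ∧
  (PySem.List.pyGet? (PySem.List.sorted arr (fun x => x) false) (n-1)).getD 0
    - (PySem.List.pyGet? (PySem.List.sorted arr (fun x => x) false) ((arr.length : Int) - 1)).getD 0 ≤ k
instance (arr : List Int) (n : Int) (k : Int) : Decidable (Pre_removals arr n k) := by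
  unfold Pre_removals; infer_instance
def pvWitness_removals : List Int × Int × Int := ([3, 1, 5], 3, 2)
def Spec_removals (arr : List Int) (n : Int) (k : Int) (out : Int) : Prop := out = removals_alt arr n k
instance (arr : List Int) (n : Int) (k : Int) (out : Int) : Decidable (Spec_removals arr n k out) := by unfold Spec_removals; infer_instance

-- ===== CLAIM (what is proved, stated in full; the proofs are below) =====
def Claim_equal_removals : Prop := ∀ (arr : List Int) (n : Int) (k : Int), Dom_removals arr n k → Pre_removals arr n k → Spec_removals arr n k (removals arr n k)

-- ===== LEMMAS AND PROOFS =====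

-- P a k e t: the inner while, scanning for end-index e, stops at start-index t
abbrev pvP (a : List Int) (k : Int) (e t : Nat) : Prop := a.length ≤ t ∨ a[e]! - a[t]! ≤ k

theorem pvP_exists (a : List Int) (k : Int) (e : Nat) : ∃ t, pvP a k e t :=
  ⟨a.length, Or.inl le_rfl⟩

-- first stopping index of the inner while for end-index e (= B's first_ge index)
def pvF (a : List Int) (k : Int) (e : Nat) : Nat := Nat.find (pvP_exists a k e)

theorem pvF_spec (a : List Int) (k : Int) (e : Nat) : pvP a k e (pvF a k e) :=
  Nat.find_spec (pvP_exists a k e)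

theorem pvF_min (a : List Int) (k : Int) (e : Nat) {t : Nat} (h : t < pvF a k e) :
    ¬ pvP a k e t := Nat.find_min (pvP_exists a k e) h

theorem pvF_le (a : List Int) (k : Int) (e : Nat) {t : Nat} (h : pvP a k e t) :
    pvF a k e ≤ t := Nat.find_min' (pvP_exists a k e) h

-- A's scan with enough fuel, started at or below the stopping index, reaches it exactly
theorem pvScan_eq (a : List Int) (k : Int) (e : Nat) (he : e < a.length)
    (hF : pvF a k e < a.length) :
    ∀ (fuel : Nat) (s : Nat), s ≤ pvF a k e → pvF a k e ≤ s + fuel →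
      pvScan a k (e : Int) fuel (s : Int) = ((pvF a k e : Nat) : Int) := by
  intro fuel
  induction fuel with
  | zero =>
    intro s h1 h2
    have hs : s = pvF a k e := by omega
    simp [pvScan, hs]
  | succ fuel ih =>
    intro s h1 h2
    have hge : PySem.List.pyGet? a (e : Int) = some a[e]! := by
      rw [PySem.List.pyGet?_natCast, List.getElem?_eq_getElem he, getElem!_pos a e he]
    by_cases hs : s = pvF a k e
    · have hslen : s < a.length := by rw [hs]; exact hF
      have hgs : PySem.List.pyGet? a (s : Int) = some a[s]! := by
        rw [PySem.List.pyGet?_natCast, List.getElem?_eq_getElem hslen, getElem!_pos a s hslen]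
      have hstop : a[e]! - a[s]! ≤ k := by
        rcases pvF_spec a k e with h | h
        · omega
        · rw [hs]; exact h
      simp only [pvScan, hge, hgs]
      rw [if_neg (not_lt.mpr hstop), hs]
    · have hlt : s < pvF a k e := lt_of_le_of_ne h1 hs
      have hnp := pvF_min a k e hlt
      unfold pvP at hnp
      rw [not_or, not_le, not_le] at hnp
      obtain ⟨hslen, hgt⟩ := hnp
      have hgs : PySem.List.pyGet? a (s : Int) = some a[s]! := by
        rw [PySem.List.pyGet?_natCast, List.getElem?_eq_getElem hslen, getElem!_pos a s hslen]
      have : ((s : Int) + 1) = ((s + 1 : Nat) : Int) := by push_cast; ring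
      simp only [pvScan, hge, hgs, if_pos hgt, this]
      exact ih (s + 1) (by omega) (by omega)

-- sorted array: values are monotone in the index
theorem pv_sorted_mono (arr : List Int) (i j : Nat)
    (hij : i ≤ j) (hj : j < (PySem.List.sorted arr (fun x => x) false).length) :
    (PySem.List.sorted arr (fun x => x) false)[i]! ≤ (PySem.List.sorted arr (fun x => x) false)[j]! := by
  have hp : (PySem.List.sorted arr (fun x => x) false).Pairwise (fun x y => x ≤ y) := by
    simpa using PySem.List.sorted_pairwise (xs := arr) (key := fun x => x)
  rcases Nat.eq_or_lt_of_le hij with h | h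
  · rw [h]
  · have hi : i < (PySem.List.sorted arr (fun x => x) false).length := lt_trans h hj
    rw [getElem!_pos (PySem.List.sorted arr (fun x => x) false) i hi,
        getElem!_pos (PySem.List.sorted arr (fun x => x) false) j hj]
    exact List.pairwise_iff_getElem.mp hp i j hi hj h

-- B's binary search, bracketed around the stopping index with enough fuel, finds it exactly
theorem pvFirstGe_eq (a : List Int) (k : Int) (e : Nat) (_he : e < a.length)
    (hmono : ∀ i j : Nat, i ≤ j → j < a.length → a[i]! ≤ a[j]!) :
    ∀ (fuel lo hi : Nat), lo ≤ pvF a k e → pvF a k e ≤ hi → hi ≤ a.length →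
      hi - lo ≤ fuel → pvFirstGe a (a[e]! - k) fuel lo hi = pvF a k e := by
  intro fuel
  induction fuel with
  | zero =>
    intro lo hi h1 h2 _ h4
    have : lo = pvF a k e := by omega
    simp [pvFirstGe, this]
  | succ fuel ih =>
    intro lo hi h1 h2 h3 h4
    by_cases hlh : lo < hi
    · have hmidlt : (lo + hi) / 2 < a.length := by omega
      have hg : PySem.List.pyGet? a (((lo + hi) / 2 : Nat) : Int) = some a[(lo + hi) / 2]! := by
        rw [PySem.List.pyGet?_natCast, List.getElem?_eq_getElem hmidlt,
            getElem!_pos a _ hmidlt]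
      by_cases hc : a[(lo + hi) / 2]! < a[e]! - k
      · -- value too small: the stopping index is strictly above mid
        have hFgt : (lo + hi) / 2 < pvF a k e := by
          by_contra hle
          rcases pvF_spec a k e with hL | hv
          · omega
          · have := hmono (pvF a k e) ((lo + hi) / 2) (by omega) hmidlt
            omega
        simp only [pvFirstGe, if_pos hlh, hg, Option.getD_some, if_pos hc]
        exact ih ((lo + hi) / 2 + 1) hi hFgt h2 h3 (by omega)
      · -- value large enough: mid itself satisfies pvP, so the stopping index is ≤ mid
        have hFle : pvF a k e ≤ (lo + hi) / 2 := pvF_le a k e (Or.inr (by omega))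
        simp only [pvFirstGe, if_pos hlh, hg, Option.getD_some, if_neg hc]
        exact ih lo ((lo + hi) / 2) h1 hFle (by omega) (by omega)
    · have hle : lo = pvF a k e := by omega
      simp only [pvFirstGe]
      rw [if_neg hlh, hle]

-- fold laws for pvMinO / relation to min?
theorem pvMinO_swap (o : Option Int) (x y : Int) :
    pvMinO (pvMinO o x) y = pvMinO (pvMinO o y) x := by
  cases o with
  | none => simp [pvMinO, min_comm]
  | some v => simp [pvMinO, min_right_comm]

theorem foldl_pvMinO_out (l : List Int) (o : Option Int) (x : Int) :
    pvMinO (l.foldl pvMinO o) x = l.foldl pvMinO (pvMinO o x) := by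
  induction l generalizing o with
  | nil => rfl
  | cons a t ih =>
    simp only [List.foldl_cons]
    rw [ih, pvMinO_swap]

theorem foldl_pvMinO_reverse (l : List Int) (o : Option Int) :
    l.reverse.foldl pvMinO o = l.foldl pvMinO o := by
  induction l generalizing o with
  | nil => rfl
  | cons a t ih =>
    simp only [List.reverse_cons, List.foldl_append, List.foldl_cons, List.foldl_nil]
    rw [ih, foldl_pvMinO_out]

theorem foldl_pvMinO_some (t : List Int) (x : Int) :
    t.foldl pvMinO (some x) = some (t.foldl min x) := by
  induction t generalizing x with
  | nil => rfl
  | cons a t ih => simp only [List.foldl_cons, pvMinO]; exact ih (min x a)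

-- A's running min-with-inf fold computes the same option as B's min?
theorem foldl_pvMinO_eq_min? (l : List Int) :
    l.foldl pvMinO none = PySem.List.min? l (fun x => x) := by
  cases l with
  | nil => rfl
  | cons x t =>
    rw [PySem.List.min?_id_cons]
    simp only [List.foldl_cons, pvMinO]
    exact foldl_pvMinO_some t x

-- reversing a map over range
theorem pv_map_range_rev (g : Nat → Int) (m : Nat) :
    (List.range m).map (fun j => g (m - 1 - j)) = ((List.range m).map g).reverse := by
  induction m with
  | zero => rfl
  | succ p ih =>
    conv_lhs => rw [List.range_succ_eq_map]
    conv_rhs => rw [List.range_succ]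
    simp only [List.map_cons, List.map_map, List.map_append, List.reverse_append,
      List.reverse_cons, List.reverse_nil, List.nil_append, List.map_nil, List.singleton_append]
    congr 1
    rw [← ih]
    apply List.map_congr_left
    intro j hj
    simp only [Function.comp_apply]
    congr 1
    omega

-- ===== VERDICT (by name: the statements are the Claim_ definitions above) =====
theorem removals_spec : Claim_equal_removals := by
  intro arr n k _ hpre
  unfold Spec_removals
  obtain ⟨h1, h2, h3⟩ := hpre
  set a := PySem.List.sorted arr (fun x => x) false with ha
  have hlen : a.length = arr.length := by rw [ha]; simp
  set n' := n.toNat with hn'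
  have hcast : (n' : Int) = n := Int.toNat_of_nonneg (by omega)
  have hn'L : n' ≤ a.length := by omega
  have hn'pos : 1 ≤ n' := by omega
  have hmono : ∀ i j : Nat, i ≤ j → j < a.length → a[i]! ≤ a[j]! := by
    intro i j hij hj
    exact pv_sorted_mono arr i j hij hj
  -- unpack the third precondition into getElem! form
  have hgn : PySem.List.pyGet? a (n - 1) = some a[n' - 1]! := by
    have he : (n - 1) = ((n' - 1 : Nat) : Int) := by omega
    rw [he, PySem.List.pyGet?_natCast, List.getElem?_eq_getElem (by omega),
        getElem!_pos a (n' - 1) (by omega)]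
  have hgL : PySem.List.pyGet? a ((arr.length : Int) - 1) = some a[a.length - 1]! := by
    have he : ((arr.length : Int) - 1) = ((a.length - 1 : Nat) : Int) := by omega
    rw [he, PySem.List.pyGet?_natCast, List.getElem?_eq_getElem (by omega),
        getElem!_pos a (a.length - 1) (by omega)]
  rw [hgn, hgL] at h3
  simp only [Option.getD_some] at h3
  -- the inner while always stops strictly inside the list
  have hFlt : ∀ e : Nat, e < n' → pvF a k e < a.length := by
    intro e he
    have hstep : pvP a k e (a.length - 1) := by
      unfold pvP
      right
      have hm := hmono e (n' - 1) (by omega) (by omega)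
      omega
    have := pvF_le a k e hstep
    omega
  -- loop invariant of port A (descending fold, with the 'last' counter)
  have loopA : ∀ m : Nat, m ≤ n' →
      ((List.range m).map (fun j : Nat => (n : Int) - 1 - (j : Int))).foldl
        (fun (st : Option Int × Int) e =>
          (pvMinO st.1 (pvScan a k e (a.length + 1) 0 + st.2), st.2 + 1)) (none, 0)
      = (((List.range m).map
            (fun j : Nat => ((pvF a k (n' - 1 - j) : Nat) : Int) + ((n : Int) - 1 - ((n' - 1 - j : Nat) : Int)))).foldl
          pvMinO none, (m : Int)) := by
    intro m
    induction m with
    | zero => simp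
    | succ p ih =>
      intro hp
      rw [List.range_succ, List.map_append, List.map_append, List.foldl_append,
          List.foldl_append, ih (by omega)]
      simp only [List.map_cons, List.map_nil, List.foldl_cons, List.foldl_nil]
      have hFp := hFlt (n' - 1 - p) (by omega)
      have hsc : pvScan a k (((n' - 1 - p : Nat) : Nat) : Int) (a.length + 1) ((0 : Nat) : Int)
          = ((pvF a k (n' - 1 - p) : Nat) : Int) :=
        pvScan_eq a k (n' - 1 - p) (by omega) hFp (a.length + 1) 0 (by omega) (by omega)
      have he : ((n : Int) - 1 - (p : Int)) = ((n' - 1 - p : Nat) : Int) := by omega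
      simp only [Prod.mk.injEq]
      constructor
      · rw [he]
        norm_num at hsc ⊢
        rw [hsc]
        congr 1
        omega
      · push_cast
        ring
  -- assemble port A
  have hA : removals arr n k
      = (((List.range n').map
            (fun j : Nat => ((pvF a k (n' - 1 - j) : Nat) : Int) + ((n : Int) - 1 - ((n' - 1 - j : Nat) : Int)))).foldl
          pvMinO none).getD 0 := by
    rw [removals, ← ha]
    rw [PySem.List.pyRange_neg_one]
    have ht : (n - 1 - (-1)).toNat = n' := by omega
    rw [ht, loopA n' le_rfl]
  -- assemble port B: each binary search finds pvF, so vals is the map of g over range n'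
  have hB : removals_alt arr n k
      = (PySem.List.min? ((List.range n').map
            (fun t : Nat => ((pvF a k t : Nat) : Int) + ((n : Int) - 1 - (t : Int))))
          (fun x => x)).getD 0 := by
    rw [removals_alt, ← ha]
    rw [PySem.List.pyRange_one]
    have ht : (n - 0).toNat = n' := by omega
    rw [ht]
    congr 2
    rw [List.map_map]
    apply List.map_congr_left
    intro j hj
    simp only [Function.comp_apply]
    have hjn : j < n' := List.mem_range.mp hj
    have hjL : j < a.length := by omega
    have hg : PySem.List.pyGet? a ((0 : Int) + (j : Nat)) = some a[j]! := by
      rw [zero_add, PySem.List.pyGet?_natCast, List.getElem?_eq_getElem hjL,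
          getElem!_pos a j hjL]
    rw [hg]
    simp only [Option.getD_some]
    have hbs : pvFirstGe a (a[j]! - k) a.length 0 a.length = pvF a k j :=
      pvFirstGe_eq a k j hjL hmono a.length 0 a.length (Nat.zero_le _)
        (pvF_le a k j (Or.inl le_rfl)) le_rfl (by omega)
    rw [hbs]
    ring
  rw [hA, hB, ← foldl_pvMinO_eq_min?]
  have hrev := pv_map_range_rev (fun t : Nat => ((pvF a k t : Nat) : Int) + ((n : Int) - 1 - (t : Int))) n'
  simp only at hrev
  rw [hrev, foldl_pvMinO_reverse]
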